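-- pv_equiv track=rewrite | github.com/danoan/stock-analyzer | services/data-ingestor/src/data_ingestor/core/jobs.py | resolve_job_tickers
-- ===== SOURCE A (Python) =====
-- from typing import Any
--
-- def resolve_job_tickers(config: dict[str, Any], collections_by_name: dict[str, list[str]]) -> list[str]:
--     """Return deduplicated union of job's individual tickers and all referenced collection tickers."""
--     seen: set[str] = set()
--     result: list[str] = []
--     for t in config.get("tickers", []):
--         if t not in seen:
--             seen.add(t)
--             result.append(t)
--     for cname in config.get("collections", []):
--         for t in collections_by_name.get(cname, []):
--             if t not in seen:
--                 seen.add(t)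
--                 result.append(t)
--     return result
-- ===== SOURCE B (Python) =====
-- def resolve_job_tickers(config, collections_by_name):
--     """Return deduplicated union of job's individual tickers and all referenced collection tickers."""
--     pending = list(config.get("tickers", []))
--     for cname in config.get("collections", []):
--         pending.extend(collections_by_name.get(cname, []))
--     result = []
--     while pending:
--         head = pending[0]
--         result.append(head)
--         pending = [t for t in pending[1:] if t != head]
--     return result
-- ===== Notes on version B (the rewrite author's own statement) =====
-- stated objective: alternative
-- what changed: Instead of A's seen-set with membership branches over two nested loops, B first flattens all sources into one pending list and then deduplicates selection-style: repeatedly emit the head and filter every later duplicate of it out of the remainder, so no auxiliary seen structure exists.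
import Mathlib
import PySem

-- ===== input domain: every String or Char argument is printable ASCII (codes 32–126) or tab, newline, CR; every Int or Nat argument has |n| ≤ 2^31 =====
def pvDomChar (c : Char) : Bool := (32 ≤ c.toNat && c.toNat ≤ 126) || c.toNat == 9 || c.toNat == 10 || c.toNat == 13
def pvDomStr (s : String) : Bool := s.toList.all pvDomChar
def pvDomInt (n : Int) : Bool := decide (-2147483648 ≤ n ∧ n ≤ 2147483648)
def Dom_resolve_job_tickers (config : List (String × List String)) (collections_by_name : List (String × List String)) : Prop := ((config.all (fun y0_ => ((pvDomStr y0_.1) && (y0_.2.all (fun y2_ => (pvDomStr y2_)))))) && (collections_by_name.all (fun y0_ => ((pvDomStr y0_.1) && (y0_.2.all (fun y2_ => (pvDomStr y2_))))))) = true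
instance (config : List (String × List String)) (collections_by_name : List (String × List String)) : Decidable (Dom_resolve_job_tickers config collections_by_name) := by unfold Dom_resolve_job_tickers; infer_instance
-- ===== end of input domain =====

-- B drops A's seen-set entirely: it flattens all sources into one pending list and deduplicates
-- selection-style (emit the head, filter its duplicates out of the remainder); objective: alternative.

-- ===== PORT A =====
def resolve_job_tickers (config : List (String × List String)) (collections_by_name : List (String × List String)) : List String :=
  let init : PySem.Set String × List String := (PySem.Set.empty, [])
  let st1 := (PySem.Dict.getD (PySem.Dict.ofList config) "tickers" []).foldl
      (fun st t => if PySem.Set.contains st.1 t then st else (PySem.Set.add st.1 t, st.2 ++ [t])) init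
  let st2 := (PySem.Dict.getD (PySem.Dict.ofList config) "collections" []).foldl
      (fun st cname => (PySem.Dict.getD (PySem.Dict.ofList collections_by_name) cname []).foldl
        (fun st t => if PySem.Set.contains st.1 t then st else (PySem.Set.add st.1 t, st.2 ++ [t])) st) st1
  st2.2

-- ===== PORT B =====
-- B's while loop: emit the head, filter every duplicate of it out of the remainder.
def pvSelectDedup : List String → List String
  | [] => []
  | h :: t => h :: pvSelectDedup (t.filter (fun y => y != h))
termination_by xs => xs.length
decreasing_by simpa using Nat.lt_succ_of_le (List.length_filter_le _ _)

def resolve_job_tickers_alt (config : List (String × List String)) (collections_by_name : List (String × List String)) : List String :=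
  let pending := (PySem.Dict.getD (PySem.Dict.ofList config) "collections" []).foldl
      (fun acc cname => acc ++ PySem.Dict.getD (PySem.Dict.ofList collections_by_name) cname [])
      (PySem.Dict.getD (PySem.Dict.ofList config) "tickers" [])
  pvSelectDedup pending

-- ===== PRECONDITION & SPEC =====
def Spec_resolve_job_tickers (config : List (String × List String)) (collections_by_name : List (String × List String)) (out : List String) : Prop := out = resolve_job_tickers_alt config collections_by_name
instance (config : List (String × List String)) (collections_by_name : List (String × List String)) (out : List String) : Decidable (Spec_resolve_job_tickers config collections_by_name out) := by unfold Spec_resolve_job_tickers; infer_instance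

-- ===== CLAIM =====
def Claim_equal_resolve_job_tickers : Prop := ∀ (config : List (String × List String)) (collections_by_name : List (String × List String)), Dom_resolve_job_tickers config collections_by_name → Spec_resolve_job_tickers config collections_by_name (resolve_job_tickers config collections_by_name)

-- ===== LEMMAS AND PROOFS =====

lemma pvSelectDedup_nil : pvSelectDedup [] = [] := by simp [pvSelectDedup]

lemma pvSelectDedup_cons (h : String) (t : List String) :
    pvSelectDedup (h :: t) = h :: pvSelectDedup (t.filter (fun y => y != h)) := by
  simp [pvSelectDedup]

-- A's dedup loop keeps seen = result; one pass equals folding Set.add.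
lemma pv_loop_eq (xs : List String) (s : PySem.Set String) :
    xs.foldl (fun (st : PySem.Set String × List String) t =>
        if PySem.Set.contains st.1 t then st else (PySem.Set.add st.1 t, st.2 ++ [t])) (s, s)
      = (xs.foldl PySem.Set.add s, xs.foldl PySem.Set.add s) := by
  induction xs generalizing s with
  | nil => rfl
  | cons x xs ih =>
      simp only [List.foldl_cons]
      have hstep : (if PySem.Set.contains s x then (s, s) else (PySem.Set.add s x, s ++ [x]))
          = ((PySem.Set.add s x : PySem.Set String), (PySem.Set.add s x : List String)) := by
        simp only [PySem.Set.add]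
        split <;> rfl
      rw [hstep, ih]

-- A's nested collection loop equals folding Set.add over the flattened collection tickers.
lemma pv_nested_eq (cs : List String) (f : String → List String) (s : PySem.Set String) :
    cs.foldl (fun (st : PySem.Set String × List String) cname =>
        (f cname).foldl (fun (st : PySem.Set String × List String) t =>
          if PySem.Set.contains st.1 t then st else (PySem.Set.add st.1 t, st.2 ++ [t])) st) (s, s)
      = ((cs.flatMap f).foldl PySem.Set.add s, (cs.flatMap f).foldl PySem.Set.add s) := by
  induction cs generalizing s with
  | cons c cs ih =>
      simp only [List.foldl_cons, List.flatMap_cons, List.foldl_append]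
      rw [pv_loop_eq, ih]
  | nil => rfl

-- Folding Set.add from seen-state s equals s followed by selection-dedup of the unseen elements.
lemma pv_foldl_add_selectDedup (t : List String) (s : PySem.Set String) :
    t.foldl PySem.Set.add s
      = (s : List String) ++ pvSelectDedup (t.filter (fun y => !PySem.Set.contains s y)) := by
  induction t generalizing s with
  | nil => simp [pvSelectDedup_nil]
  | cons h t ih =>
      simp only [List.foldl_cons, List.filter_cons]
      by_cases hc : PySem.Set.contains s h
      · have hmem : h ∈ s := by simpa [PySem.Set.contains] using hc
        have hadd : PySem.Set.add s h = s := by simp [PySem.Set.add, hmem]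
        rw [hadd, ih, hc]
        simp
      · have hadd : PySem.Set.add s h = s ++ [h] := by
          simp only [PySem.Set.add]
          rw [if_neg hc]
        have hcb : PySem.Set.contains s h = false := by
          exact Bool.eq_false_iff.mpr hc
        rw [hadd, ih, hcb]
        simp only [Bool.not_false, if_pos, List.append_assoc, List.singleton_append,
          pvSelectDedup_cons, List.filter_filter]
        congr 3
        apply List.filter_congr
        intro y _
        by_cases hy : y = h
        · subst hy
          simp [PySem.Set.contains]
        · simp [PySem.Set.contains, hy]

-- B's accumulator `pending` loop equals the tickers followed by the flattened collections.
lemma pv_pending_eq (cs : List String) (f : String → List String) (init : List String) :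
    cs.foldl (fun acc cname => acc ++ f cname) init = init ++ cs.flatMap f := by
  induction cs generalizing init with
  | nil => simp
  | cons c cs ih => simp [List.foldl_cons, ih, List.flatMap_cons]

-- ===== VERDICT =====
theorem resolve_job_tickers_spec : Claim_equal_resolve_job_tickers := by
  intro config collections_by_name _
  unfold Spec_resolve_job_tickers resolve_job_tickers resolve_job_tickers_alt
  dsimp only
  rw [pv_pending_eq]
  rw [show (PySem.Set.empty, ([] : List String)) = (([] : PySem.Set String), ([] : List String)) from rfl,
      pv_loop_eq, pv_nested_eq, ← List.foldl_append, pv_foldl_add_selectDedup]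
  simp [PySem.Set.contains]
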